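-- pv_equiv track=rewrite | github.com/2021-Algorithm/algorithms_site | robin/python/programmers/level2/study16/[1차]캐시.py | try_first_solution
-- ===== SOURCE A (Python) =====
-- from collections import deque
--
-- def try_first_solution(cacheSize, cities):
--     """
--     failed: 테스트는 다 성공했는데, 제출하면 40점..
--     """
--     cities_queue = deque(cities)
--     cache = []
--     timer = 0
--
--     while len(cities_queue) != 0:
--         city = str(cities_queue.popleft()).upper()
--
--         if city in cache:
--             timer += 1
--         else:
--             timer += 5
--
--         if len(cache) <= cacheSize:
--             cache.append(city)
--         elif len(cache) > cacheSize:
--             cache.pop(0)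
--             cache.append(city)
--
--     return timer
-- ===== SOURCE B (Python) =====
-- def try_first_solution(cacheSize, cities):
--     last = {}
--     timer = 0
--     for i, city in enumerate(cities):
--         c = str(city).upper()
--         j = last.get(c)
--         timer += 1 if j is not None and i - j <= cacheSize + 1 else 5
--         last[c] = i
--     return timer
-- ===== Notes on version B (the rewrite author's own statement) =====
-- stated objective: faster
-- what changed: Replaces A's mutable FIFO cache (a per-step linear membership scan plus append/pop(0)) by a single pass that keeps a dict from each uppercased city to its last index and tests 'i - last_index <= cacheSize + 1', reproducing A's cacheSize+1 window exactly.
import Mathlib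
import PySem

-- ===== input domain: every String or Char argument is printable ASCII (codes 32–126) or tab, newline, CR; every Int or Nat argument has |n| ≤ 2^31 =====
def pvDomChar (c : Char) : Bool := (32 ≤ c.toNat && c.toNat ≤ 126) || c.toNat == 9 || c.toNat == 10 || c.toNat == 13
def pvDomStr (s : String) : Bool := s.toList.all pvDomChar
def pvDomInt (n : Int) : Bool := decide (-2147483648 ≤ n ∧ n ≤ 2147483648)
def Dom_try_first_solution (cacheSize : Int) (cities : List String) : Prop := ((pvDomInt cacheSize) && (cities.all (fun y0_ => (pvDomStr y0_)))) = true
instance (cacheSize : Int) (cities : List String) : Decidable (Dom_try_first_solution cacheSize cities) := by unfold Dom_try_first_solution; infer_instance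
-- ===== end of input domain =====

-- B replaces A's mutable FIFO cache (membership scan + append/pop per step) by a single pass with a
-- last-occurrence-index dict; objective: faster (O(n) vs O(n·min(n,cacheSize))). Return-value equivalence only.

-- ===== PORT A =====
def try_first_solution (cacheSize : Int) (cities : List String) : Int :=
  (cities.foldl (fun (st : List String × Int) s =>
    let city := PySem.Str.upper s
    let timer := st.2 + (if st.1.contains city then 1 else 5)
    -- cache.pop(0): Python raises IndexError on an empty cache (only reachable when cacheSize < 0,
    -- excluded by Pre_); 'drop 1' is exact on a nonempty cache
    let cache := if (st.1.length : Int) ≤ cacheSize then st.1 ++ [city]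
                 else st.1.drop 1 ++ [city]
    (cache, timer)) ([], 0)).2

-- ===== PORT B =====
def try_first_solution_alt (cacheSize : Int) (cities : List String) : Int :=
  ((PySem.List.enumerate cities).foldl (fun (st : PySem.Dict String Int × Int) p =>
    let c := PySem.Str.upper p.2
    let hit := match st.1.get? c with
      | some j => decide (p.1 - j ≤ cacheSize + 1)
      | none => false
    (st.1.insert c p.1, st.2 + (if hit then 1 else 5))) (PySem.Dict.empty, 0)).2

-- ===== PRECONDITION & SPEC =====
-- Pre_ excludes exactly the inputs where A raises IndexError ('pop from empty list'):
-- a negative cacheSize together with a non-empty city list.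
def Pre_try_first_solution (cacheSize : Int) (cities : List String) : Prop :=
  0 ≤ cacheSize ∨ cities = []
instance (cacheSize : Int) (cities : List String) : Decidable (Pre_try_first_solution cacheSize cities) := by unfold Pre_try_first_solution; infer_instance
def pvWitness_try_first_solution : Int × List String := (1, ["jeju", "pangyo", "JEJU"])

def Spec_try_first_solution (cacheSize : Int) (cities : List String) (out : Int) : Prop := out = try_first_solution_alt cacheSize cities
instance (cacheSize : Int) (cities : List String) (out : Int) : Decidable (Spec_try_first_solution cacheSize cities out) := by unfold Spec_try_first_solution; infer_instance

-- ===== CLAIM (what is proved, stated in full; the proofs are below) =====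
def Claim_equal_try_first_solution : Prop := ∀ (cacheSize : Int) (cities : List String), Dom_try_first_solution cacheSize cities → Pre_try_first_solution cacheSize cities → Spec_try_first_solution cacheSize cities (try_first_solution cacheSize cities)

-- ===== LEMMAS AND PROOFS =====

-- last index of c in u (Python-side: most recent value stored for key c), counted from the front
def lastIdx (c : String) : List String → Option Int
  | [] => none
  | x :: r => match lastIdx c r with
      | some j => some (j + 1)
      | none => if x = c then some 0 else none

-- reference cost of processing `rest` after an (already uppercased) prefix `u`, window w
def ext (w : Nat) (u : List String) : List String → Int
  | [] => 0
  | s :: r =>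
      let c := PySem.Str.upper s
      (if ((u.drop (u.length - w)).contains c) then 1 else 5) + ext w (u ++ [c]) r

lemma lastIdx_nonneg (c : String) (u : List String) (j : Int) (h : lastIdx c u = some j) : 0 ≤ j := by
  induction u generalizing j with
  | nil => simp [lastIdx] at h
  | cons x r ih =>
    simp only [lastIdx] at h
    rcases hr : lastIdx c r with _ | j'
    · rw [hr] at h
      split_ifs at h
      all_goals simp_all
    · rw [hr] at h; simp at h; have := ih _ hr; omega

lemma lastIdx_none_iff (c : String) (u : List String) : lastIdx c u = none ↔ ¬ u.contains c := by
  induction u with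
  | nil => simp [lastIdx]
  | cons x r ih =>
    simp only [lastIdx]
    rcases hr : lastIdx c r with _ | j'
    · have := ih.mp hr
      split_ifs with hx <;> simp_all [eq_comm]
    · have : ¬ (lastIdx c r = none) := by simp [hr]
      rw [ih] at this
      simp_all

-- the dict-window test equals membership in the last (cacheSize+1) processed entries
lemma hit_eq (cacheSize : Int) (hcs : 0 ≤ cacheSize) (u : List String) (c : String) :
    (match lastIdx c u with
      | some j => decide ((u.length : Int) - j ≤ cacheSize + 1)
      | none => false)
    = (u.drop (u.length - (cacheSize + 1).toNat)).contains c := by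
  induction u with
  | nil => simp [lastIdx]
  | cons x r ih =>
    by_cases hlen : r.length < (cacheSize + 1).toNat
    · -- window is the whole list; hit ↔ c occurs at all
      have hdrop : (x :: r).length - (cacheSize + 1).toNat = 0 := by
        simp only [List.length_cons]; omega
      rw [hdrop, List.drop_zero]
      simp only [lastIdx]
      rcases hr : lastIdx c r with _ | j'
      · split_ifs with hx
        · subst hx
          have : (((x :: r).length : Int) - 0 ≤ cacheSize + 1) := by
            simp only [List.length_cons]; push_cast; omega
          simp
          omega
        · have hnc := (lastIdx_none_iff c r).mp hr
          simp [Ne.symm hx]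
          simpa using hnc
      · have hj0 : 0 ≤ j' := lastIdx_nonneg c r _ hr
        have hjlt : ¬ (lastIdx c r = none) := by simp [hr]
        rw [lastIdx_none_iff] at hjlt
        have : (((x :: r).length : Int) - (j' + 1) ≤ cacheSize + 1) := by
          simp only [List.length_cons]; push_cast; omega
        simp [by simpa using hjlt]
        omega
    · -- window drops the head: same window as for r
      have hdrop : (x :: r).length - (cacheSize + 1).toNat = (r.length - (cacheSize + 1).toNat) + 1 := by
        simp only [List.length_cons]; omega
      rw [hdrop, List.drop_succ_cons]
      simp only [lastIdx]
      rcases hr : lastIdx c r with _ | j'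
      · split_ifs with hx
        · -- only occurrence is the head, which is outside the window
          have hlhs : ¬ (((x :: r).length : Int) - 0 ≤ cacheSize + 1) := by
            simp only [List.length_cons]; push_cast; omega
          have hnc := (lastIdx_none_iff c r).mp hr
          have : ¬ (r.drop (r.length - (cacheSize + 1).toNat)).contains c := by
            intro hmem
            exact hnc (by simpa using List.mem_of_mem_drop (by simpa using hmem))
          simp
          constructor
          · intro h; exact absurd h (by omega)
          · intro h; exact absurd (List.mem_of_mem_drop h) (by simpa using hnc)
        · have hnc := (lastIdx_none_iff c r).mp hr
          simp
          intro h; exact absurd (List.mem_of_mem_drop h) (by simpa using hnc)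
      · have := ih
        rw [hr] at this
        rw [← this]
        have : (((x :: r).length : Int) - (j' + 1) ≤ cacheSize + 1) ↔ ((r.length : Int) - j' ≤ cacheSize + 1) := by
          simp only [List.length_cons]; push_cast; omega
        simp

-- A's loop, from a state whose cache is the window of the processed (uppercased) prefix u
lemma A_inv (cacheSize : Int) (hcs : 0 ≤ cacheSize) (rest : List String) :
    ∀ (u : List String) (t : Int),
    (rest.foldl (fun (st : List String × Int) s =>
      let city := PySem.Str.upper s
      let timer := st.2 + (if st.1.contains city then 1 else 5)
      let cache := if (st.1.length : Int) ≤ cacheSize then st.1 ++ [city]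
                   else st.1.drop 1 ++ [city]
      (cache, timer)) (u.drop (u.length - (cacheSize + 1).toNat), t)).2
    = t + ext (cacheSize + 1).toNat u rest := by
  induction rest with
  | nil => intro u t; simp [ext]
  | cons s r ih =>
    intro u t
    simp only [List.foldl_cons, ext]
    set w : Nat := (cacheSize + 1).toNat with hw
    have hw1 : 1 ≤ w := by omega
    have hwin_len : (u.drop (u.length - w)).length = u.length - (u.length - w) := by
      simp
    by_cases hlen : u.length < w
    · have hcond : ((u.drop (u.length - w)).length : Int) ≤ cacheSize := by
        rw [hwin_len]; omega
      have hd0 : u.length - w = 0 := by omega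
      have hd1 : (u ++ [PySem.Str.upper s]).length - w = 0 := by simp; omega
      rw [if_pos hcond]
      have := ih (u ++ [PySem.Str.upper s]) (t + (if (u.drop (u.length - w)).contains (PySem.Str.upper s) then 1 else 5))
      rw [hd1, List.drop_zero] at this
      rw [hd0, List.drop_zero] at *
      rw [this]; ring
    · have hcond : ¬ ((u.drop (u.length - w)).length : Int) ≤ cacheSize := by
        rw [hwin_len]
        have : u.length - (u.length - w) = w := by omega
        rw [this]; omega
      rw [if_neg hcond]
      have hstep : (u.drop (u.length - w)).drop 1 ++ [PySem.Str.upper s]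
          = (u ++ [PySem.Str.upper s]).drop ((u ++ [PySem.Str.upper s]).length - w) := by
        rw [List.drop_drop, List.drop_append_of_le_length (by simp; omega)]
        congr 2
        simp; omega
      rw [hstep]
      rw [ih (u ++ [PySem.Str.upper s]) (t + (if (u.drop (u.length - w)).contains (PySem.Str.upper s) then 1 else 5))]
      ring

-- B's loop, from a dict that stores the last index of every key seen in the prefix u
lemma B_inv (cacheSize : Int) (hcs : 0 ≤ cacheSize) (rest : List String) :
    ∀ (u : List String) (t : Int) (d : PySem.Dict String Int),
    (∀ c, d.get? c = lastIdx c u) →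
    ((PySem.List.enumerate rest (u.length : Int)).foldl (fun (st : PySem.Dict String Int × Int) p =>
      let c := PySem.Str.upper p.2
      let hit := match st.1.get? c with
        | some j => decide (p.1 - j ≤ cacheSize + 1)
        | none => false
      (st.1.insert c p.1, st.2 + (if hit then 1 else 5))) (d, t)).2
    = t + ext (cacheSize + 1).toNat u rest := by
  induction rest with
  | nil => intro u t d _; simp [PySem.List.enumerate, ext]
  | cons s r ih =>
    intro u t d hd
    rw [PySem.List.enumerate_cons, List.foldl_cons]
    simp only [ext]
    have hlast : ∀ c, (d.insert (PySem.Str.upper s) (u.length : Int)).get? c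
        = lastIdx c (u ++ [PySem.Str.upper s]) := by
      intro c
      by_cases hc : c = PySem.Str.upper s
      · subst hc
        rw [PySem.Dict.get?_insert_self]
        clear hd; induction u with
        | nil => simp [lastIdx]
        | cons x r' ih' =>
          simp only [List.cons_append, lastIdx]
          rcases hr : lastIdx (PySem.Str.upper s) (r' ++ [PySem.Str.upper s]) with _ | j'
          · exfalso
            have := (lastIdx_none_iff _ _).mp hr
            simp at this
          · rw [hr] at ih'
            simp only [Option.some.injEq, List.length_cons] at ih' ⊢
            push_cast
            omega
      · rw [PySem.Dict.get?_insert_of_ne _ _ hc, hd c]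
        clear hd; induction u with
        | nil => simp [lastIdx, Ne.symm hc]
        | cons x r' ih' =>
          simp only [List.cons_append, lastIdx, ih']
      -- (the last index of c is unchanged by appending a different key)
    have hhit : (match d.get? (PySem.Str.upper s) with
        | some j => decide ((u.length : Int) - j ≤ cacheSize + 1)
        | none => false)
        = (u.drop (u.length - (cacheSize + 1).toNat)).contains (PySem.Str.upper s) := by
      rw [hd]; exact hit_eq cacheSize hcs u (PySem.Str.upper s)
    have := ih (u ++ [PySem.Str.upper s])
      (t + (if (u.drop (u.length - (cacheSize + 1).toNat)).contains (PySem.Str.upper s) then 1 else 5))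
      (d.insert (PySem.Str.upper s) (u.length : Int)) hlast
    simp only [List.length_append, List.length_cons, List.length_nil] at this
    have hcast : ((u.length : Int) + 1) = ((u.length + 1 : Nat) : Int) := by push_cast; ring
    simp only [hhit]
    rw [hcast]
    rw [show (u.length + 1 : Nat) = u.length + [PySem.Str.upper s].length by simp] at *
    rw [this]
    ring

-- ===== VERDICT (by name: the statement is the Claim_ definition above) =====
theorem try_first_solution_spec : Claim_equal_try_first_solution := by
  intro cacheSize cities _ hpre
  unfold Spec_try_first_solution try_first_solution try_first_solution_alt
  rcases hpre with hcs | hnil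
  · have hA := A_inv cacheSize hcs cities [] 0
    have hB := B_inv cacheSize hcs cities [] 0 PySem.Dict.empty (by intro c; simp [lastIdx, PySem.Dict.get?, PySem.Dict.empty])
    simp only [List.drop_nil, List.length_nil, Nat.cast_zero] at hA hB
    exact hA.trans hB.symm
  · subst hnil; rfl
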